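-- pv_equiv track=rewrite | github.com/TerryDanHawk/PythonMathFun | Primary/MathLib/Probability/Functions.py | ExpandBinomial
-- ===== SOURCE A (Python) =====
-- def F(n):
--     result=1
--     if n==0:
--         return result;
--     else:
--         for i in range(n, 1, -1):
--             result *= i
--     return result
--
-- def C(n,m):
--
--     result=F(n)//(F(m)*F(n-m)) if (F(m)*F(n-m)) != 0 else 0
--     return  result
--
-- def  ExpandBinomial(n):
--     result=""
--     for k in range(0,n+1,1):
--         item=""
--         a1=C(n,k)
--         a2=n-k
--         a3=k
--         if a1!=1:
--             item += str(a1)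
--
--         if a2==0:
--             item += ""
--         elif a2==1:
--             item += "x"
--         else:
--             item += "x^" + str(a2)+" "
--
--         if a3==0:
--             item += ""
--         elif a3==1:
--             item += "y"
--         else:
--             item += "y^" + str(a3)+" "
--
--
--         if item=="":
--             item="1"
--         result+=item+"+"
--     if len(result) > 0:
--         result = result[0:len(result) - 1]
--
--     return  result
-- ===== SOURCE B (Python) =====
-- def ExpandBinomial(n):
--     if n < 0:
--         return ""
--     # one precompute pass: Pascal's triangle row n (no factorials)
--     coeffs = [1]
--     for _ in range(n):
--         coeffs = [1] + [a + b for a, b in zip(coeffs, coeffs[1:])] + [1]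
--     parts = []
--     for k in range(n + 1):
--         a1, a2, a3 = coeffs[k], n - k, k
--         item = ""
--         if a1 != 1:
--             item += str(a1)
--         if a2 == 1:
--             item += "x"
--         elif a2 != 0:
--             item += "x^" + str(a2) + " "
--         if a3 == 1:
--             item += "y"
--         elif a3 != 0:
--             item += "y^" + str(a3) + " "
--         parts.append(item or "1")
--     return "+".join(parts)
-- ===== Notes on version B (the rewrite author's own statement) =====
-- stated objective: faster
-- what changed: Coefficients come from one precomputed Pascal-triangle row (repeated adjacent sums) instead of three factorial products and a division per term, and the result is assembled with '+'.join(parts) instead of append-then-strip-last-character.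
import Mathlib
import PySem

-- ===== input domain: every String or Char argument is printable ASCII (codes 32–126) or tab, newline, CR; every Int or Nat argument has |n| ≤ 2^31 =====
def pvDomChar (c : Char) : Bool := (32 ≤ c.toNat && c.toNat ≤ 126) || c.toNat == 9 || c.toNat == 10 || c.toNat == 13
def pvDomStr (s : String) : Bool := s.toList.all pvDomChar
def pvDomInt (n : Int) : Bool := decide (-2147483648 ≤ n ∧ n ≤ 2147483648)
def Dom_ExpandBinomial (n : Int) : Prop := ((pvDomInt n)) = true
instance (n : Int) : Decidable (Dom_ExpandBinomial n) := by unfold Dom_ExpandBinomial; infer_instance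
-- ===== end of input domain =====

-- B replaces the per-term factorial/division coefficient computation by a precomputed
-- Pascal-triangle row and builds the result with a join instead of append-then-strip (objective: faster).

-- ===== PORT A =====
def pvF (n : Int) : Int :=
  let result : Int := 1
  if n == 0 then result
  else (PySem.List.pyRange n 1 (-1)).foldl (fun result i => result * i) result

def pvC (n m : Int) : Int :=
  if pvF m * pvF (n - m) != 0 then PySem.Int.floordiv (pvF n) (pvF m * pvF (n - m)) else 0

def ExpandBinomial (n : Int) : String :=
  let result :=
    (PySem.List.pyRange 0 (n + 1) 1).foldl (fun result k =>
      let item := ""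
      let a1 := pvC n k
      let a2 := n - k
      let a3 := k
      let item := if a1 != 1 then item ++ PySem.Int.toStr a1 else item
      let item := if a2 == 0 then item ++ "" else if a2 == 1 then item ++ "x"
                  else item ++ "x^" ++ PySem.Int.toStr a2 ++ " "
      let item := if a3 == 0 then item ++ "" else if a3 == 1 then item ++ "y"
                  else item ++ "y^" ++ PySem.Int.toStr a3 ++ " "
      let item := if item == "" then "1" else item
      result ++ item ++ "+") ""
  if PySem.Str.len result > 0 then
    PySem.Str.slice result (some 0) (some (PySem.Str.len result - 1))
  else result

-- ===== PORT B =====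
-- one Pascal step: [1] + [a+b for a,b in zip(coeffs, coeffs[1:])] + [1]
def pvPascalStep (r : List Int) : List Int :=
  [1] ++ (r.zip r.tail).map (fun ab => ab.1 + ab.2) ++ [1]

-- 'for _ in range(n): coeffs = step(coeffs)' starting from [1]
def pvPascalRow : Nat → List Int
  | 0 => [1]
  | m + 1 => pvPascalStep (pvPascalRow m)

def ExpandBinomial_alt (n : Int) : String :=
  if n < 0 then "" else
  let coeffs := pvPascalRow n.toNat
  let parts := (PySem.List.pyRange 0 (n + 1) 1).map (fun k =>
    let a1 := PySem.List.pyGetD coeffs k 0   -- coeffs[k]; k is always in range here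
    let a2 := n - k
    let a3 := k
    let item := ""
    let item := if a1 != 1 then item ++ PySem.Int.toStr a1 else item
    let item := if a2 == 1 then item ++ "x"
                else if a2 != 0 then item ++ "x^" ++ PySem.Int.toStr a2 ++ " " else item
    let item := if a3 == 1 then item ++ "y"
                else if a3 != 0 then item ++ "y^" ++ PySem.Int.toStr a3 ++ " " else item
    if item == "" then "1" else item)
  PySem.Str.join "+" parts

-- ===== PRECONDITION & SPEC =====
def Spec_ExpandBinomial (n : Int) (out : String) : Prop := out = ExpandBinomial_alt n
instance (n : Int) (out : String) : Decidable (Spec_ExpandBinomial n out) := by unfold Spec_ExpandBinomial; infer_instance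

-- ===== CLAIM (what is proved, stated in full; the proofs are below) =====
def Claim_equal_ExpandBinomial : Prop := ∀ (n : Int), Dom_ExpandBinomial n → Spec_ExpandBinomial n (ExpandBinomial n)

-- ===== LEMMAS AND PROOFS =====

-- product of range(j, 1, -1) is j!
lemma pvProdRange (j : Nat) : (PySem.List.pyRange (j : Int) 1 (-1)).prod = ((Nat.factorial j : Nat) : Int) := by
  induction j with
  | zero => rw [PySem.List.pyRange_neg_one_eq_nil (by norm_num)]; simp [Nat.factorial]
  | succ m ih =>
    rcases Nat.eq_zero_or_pos m with hm | hm
    · subst hm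
      rw [PySem.List.pyRange_neg_one_eq_nil (by norm_num)]
      simp [Nat.factorial]
    · have h1 : (1 : Int) < ((m : Int) + 1) := by exact_mod_cast Nat.succ_lt_succ hm
      rw [show ((m + 1 : Nat) : Int) = (m : Int) + 1 by push_cast; ring,
        PySem.List.pyRange_neg_one_cons h1]
      simp only [List.prod_cons, add_sub_cancel_right, ih]
      push_cast [Nat.factorial_succ]
      ring

lemma pvF_eq (m : Int) (hm : 0 ≤ m) : pvF m = ((Nat.factorial m.toNat : Nat) : Int) := by
  rcases eq_or_ne m 0 with h0 | h0
  · subst h0; simp [pvF]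
  · have : pvF m = (PySem.List.pyRange m 1 (-1)).foldl (fun r i => r * i) 1 := by
      simp [pvF, h0]
    have h := pvProdRange m.toNat
    rw [Int.toNat_of_nonneg hm] at h
    rw [this, ← List.prod_eq_foldl, h]

lemma pvC_eq (n k : Int) (hk : 0 ≤ k) (hkn : k ≤ n) :
    pvC n k = ((Nat.choose n.toNat k.toNat : Nat) : Int) := by
  have hnk : 0 ≤ n - k := by omega
  have hsub : (n - k).toNat = n.toNat - k.toNat := by omega
  have hden : pvF k * pvF (n - k) =
      ((Nat.factorial k.toNat * Nat.factorial (n.toNat - k.toNat) : Nat) : Int) := by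
    rw [pvF_eq k hk, pvF_eq (n - k) hnk, hsub]; push_cast; ring
  have hdpos : (0 : Int) < pvF k * pvF (n - k) := by
    rw [hden]; exact_mod_cast Nat.mul_pos (Nat.factorial_pos _) (Nat.factorial_pos _)
  have hne : (pvF k * pvF (n - k) != 0) = true := by
    simp only [bne_iff_ne, ne_eq]; omega
  have hkle : k.toNat ≤ n.toNat := by omega
  have hfact : Nat.choose n.toNat k.toNat * Nat.factorial k.toNat * Nat.factorial (n.toNat - k.toNat)
      = Nat.factorial n.toNat := Nat.choose_mul_factorial_mul_factorial hkle
  simp only [pvC, hne, if_true]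
  rw [pvF_eq n (by omega), hden]
  rw [PySem.Int.floordiv_eq_iff_of_pos (by exact_mod_cast Nat.mul_pos (Nat.factorial_pos _) (Nat.factorial_pos _))]
  constructor
  · push_cast [← hfact]; ring_nf; omega
  · push_cast [← hfact]
    have : (0 : Int) < (Nat.factorial k.toNat : Int) * (Nat.factorial (n.toNat - k.toNat) : Int) := by
      exact_mod_cast Nat.mul_pos (Nat.factorial_pos _) (Nat.factorial_pos _)
    nlinarith

lemma pvPascalRow_eq (m : Nat) :
    pvPascalRow m = (List.range (m + 1)).map (fun i => ((Nat.choose m i : Nat) : Int)) := by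
  induction m with
  | zero => simp [pvPascalRow]
  | succ m ih =>
    rw [pvPascalRow, ih]
    apply List.ext_getElem
    · simp [pvPascalStep, List.length_zip]
    · intro i h1 h2
      simp only [List.length_range, List.length_map] at h2
      have hrw : pvPascalStep ((List.range (m + 1)).map fun i => ((Nat.choose m i : Nat) : Int)) =
          1 :: ((((List.range (m + 1)).map fun i => ((Nat.choose m i : Nat) : Int)).zip
            (((List.range (m + 1)).map fun i => ((Nat.choose m i : Nat) : Int)).tail)).map
              (fun ab => ab.1 + ab.2) ++ [1]) := by simp [pvPascalStep]
      simp only [hrw]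
      rcases i with _ | i
      · simp
      · rw [List.getElem_cons_succ]
        have hlen : ((((List.range (m + 1)).map fun i => ((Nat.choose m i : Nat) : Int)).zip
            (((List.range (m + 1)).map fun i => ((Nat.choose m i : Nat) : Int)).tail)).map
              (fun ab => ab.1 + ab.2)).length = m := by
          simp [List.length_zip]
        by_cases him : i < m
        · rw [List.getElem_append_left (by omega)]
          simp only [List.getElem_map, List.getElem_zip, List.getElem_tail, List.getElem_range]
          rw [Nat.choose_succ_succ, Nat.cast_add]
        · have him' : i = m := by omega
          subst him'
          rw [List.getElem_append_right (by omega)]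
          simp [hlen, Nat.choose_self]

lemma pvCoeff_eq (n k : Int) (hn : 0 ≤ n) (hk : 0 ≤ k) (hkn : k ≤ n) :
    PySem.List.pyGetD (pvPascalRow n.toNat) k 0 = ((Nat.choose n.toNat k.toNat : Nat) : Int) := by
  rw [PySem.List.pyGetD_of_nonneg _ _ hk, pvPascalRow_eq]
  have hlt : k.toNat < n.toNat + 1 := by omega
  rw [List.getD_eq_getElem?_getD]
  simp [hlt]

-- the second/third branch blocks of A and B produce the same string
lemma pvBranch_eq (s X Y : String) (a : Int) :
    (if a == 0 then s ++ "" else if a == 1 then X else Y) =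
    (if a == 1 then X else if a != 0 then Y else s) := by
  by_cases h0 : a = 0 <;> by_cases h1 : a = 1 <;> simp_all

-- A's accumulate-with-'+' loop, written as a flatten
lemma pvFoldl_plus (l : List Int) (f : Int → String) : ∀ acc : String,
    (l.foldl (fun res k => res ++ f k ++ "+") acc).toList =
      acc.toList ++ ((l.map f).map (fun s => s.toList ++ ['+'])).flatten := by
  induction l with
  | nil => intro acc; simp
  | cons x xs ih =>
    intro acc
    simp only [List.foldl_cons, List.map_cons, List.flatten_cons, ih,
      String.toList_append]
    have : ("+" : String).toList = ['+'] := rfl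
    rw [this]
    simp [List.append_assoc]

-- dropping the trailing '+' of the flatten gives the '+'-join
lemma pvFlatten_dropLast (ps : List (List Char)) (h : ps ≠ []) :
    ((ps.map (fun p => p ++ ['+'])).flatten).dropLast = PySem.Chars.join ['+'] ps := by
  induction ps with
  | nil => exact absurd rfl h
  | cons p rest ih =>
    rcases rest with _ | ⟨q, rest⟩
    · simp [PySem.Chars.join_singleton]
    · have hne : (((q :: rest).map (fun p => p ++ ['+'])).flatten) ≠ [] := by simp
      rw [List.map_cons, List.flatten_cons, List.dropLast_append_of_ne_nil hne,
          ih (by simp), PySem.Chars.join_cons_cons]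

-- the loop body of A (with the factorial coefficient) and of B (with the Pascal coefficient)
def pvItemA (n k : Int) : String :=
  let item := ""
  let a1 := pvC n k
  let a2 := n - k
  let a3 := k
  let item := if a1 != 1 then item ++ PySem.Int.toStr a1 else item
  let item := if a2 == 0 then item ++ "" else if a2 == 1 then item ++ "x"
              else item ++ "x^" ++ PySem.Int.toStr a2 ++ " "
  let item := if a3 == 0 then item ++ "" else if a3 == 1 then item ++ "y"
              else item ++ "y^" ++ PySem.Int.toStr a3 ++ " "
  if item == "" then "1" else item

def pvItemB (n k : Int) : String :=
  let a1 := PySem.List.pyGetD (pvPascalRow n.toNat) k 0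
  let a2 := n - k
  let a3 := k
  let item := ""
  let item := if a1 != 1 then item ++ PySem.Int.toStr a1 else item
  let item := if a2 == 1 then item ++ "x"
              else if a2 != 0 then item ++ "x^" ++ PySem.Int.toStr a2 ++ " " else item
  let item := if a3 == 1 then item ++ "y"
              else if a3 != 0 then item ++ "y^" ++ PySem.Int.toStr a3 ++ " " else item
  if item == "" then "1" else item

lemma pvItem_eq (n k : Int) (hn : 0 ≤ n) (hk : 0 ≤ k) (hkn : k ≤ n) :
    pvItemA n k = pvItemB n k := by
  simp only [pvItemA, pvItemB, pvC_eq n k hk hkn, pvCoeff_eq n k hn hk hkn]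
  rw [pvBranch_eq, pvBranch_eq]

-- ===== VERDICT (by name: the statement is the Claim_ definition above) =====
theorem ExpandBinomial_spec : Claim_equal_ExpandBinomial := by
  intro n _
  unfold Spec_ExpandBinomial
  by_cases hn : n < 0
  · have hnil : PySem.List.pyRange 0 (n + 1) 1 = [] :=
      PySem.List.pyRange_one_eq_nil (by omega)
    simp [ExpandBinomial, ExpandBinomial_alt, hnil, hn, PySem.Str.len]
  · have hn0 : 0 ≤ n := by omega
    have hA : ExpandBinomial n =
        (let r := (PySem.List.pyRange 0 (n + 1) 1).foldl
            (fun res k => res ++ pvItemA n k ++ "+") ""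
         if PySem.Str.len r > 0 then
           PySem.Str.slice r (some 0) (some (PySem.Str.len r - 1))
         else r) := rfl
    have hB : ExpandBinomial_alt n =
        PySem.Str.join "+" ((PySem.List.pyRange 0 (n + 1) 1).map (pvItemB n)) := by
      show (if n < 0 then "" else _) = _
      rw [if_neg hn]
      rfl
    have hfold : (PySem.List.pyRange 0 (n + 1) 1).foldl
          (fun res k => res ++ pvItemA n k ++ "+") "" =
        (PySem.List.pyRange 0 (n + 1) 1).foldl
          (fun res k => res ++ pvItemB n k ++ "+") "" := by
      apply PySem.List.foldl_congr_mem
      intro acc k hkmem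
      rw [PySem.List.mem_pyRange_one] at hkmem
      rw [pvItem_eq n k hn0 hkmem.1 (by omega)]
    rw [hA, hB, hfold]
    set L := PySem.List.pyRange 0 (n + 1) 1 with hL
    set r := L.foldl (fun res k => res ++ pvItemB n k ++ "+") "" with hrdef
    have hr : r.toList = ((L.map (pvItemB n)).map (fun s => s.toList ++ ['+'])).flatten := by
      rw [hrdef, pvFoldl_plus L (pvItemB n) ""]
      rfl
    obtain ⟨k0, rest, hcons⟩ : ∃ k0 rest, L = k0 :: rest :=
      ⟨0, _, PySem.List.pyRange_one_cons (by omega)⟩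
    have hrne : r.toList ≠ [] := by
      rw [hr, hcons]; simp
    have hlen : 0 < (r.toList.length : Int) := by
      have := List.length_pos_of_ne_nil hrne
      omega
    have hlenr : PySem.Str.len r = (r.toList.length : Int) := PySem.Str.len_eq r
    rw [if_pos (by rw [hlenr]; omega)]
    apply String.toList_inj.mp
    rw [PySem.Str.toList_slice]
    simp only [PySem.Chars.slice_eq_listSlice, PySem.List.slice_zero_start, hlenr]
    rw [show ((r.toList.length : Int) - 1) = ((r.toList.length - 1 : Nat) : Int) by omega,
      PySem.List.slice_to_natCast, ← List.dropLast_eq_take, hr]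
    rw [show (L.map (pvItemB n)).map (fun s => s.toList ++ ['+']) =
        ((L.map (pvItemB n)).map String.toList).map (fun p => p ++ ['+']) by
      simp [List.map_map]]
    rw [pvFlatten_dropLast _ (by rw [hcons]; simp)]
    rw [PySem.Str.toList_join]
    rfl
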